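-- pv_equiv track=rewrite | github.com/Matthew-Pidlysny/Empirinometry | Program-Bin/irrational-rationale-prover.py | _validate_period
-- ===== SOURCE A (Python) =====
-- from typing import List, Tuple, Optional, Union
--
-- def _validate_period(sequence: List, period: int, min_cycles: int = 2) -> bool:
--     """Validate period with multiple cycle checks"""
--     if len(sequence) < period * min_cycles:
--         return False
--
--     # Check that the pattern repeats for min_cycles
--     for i in range(1, min_cycles):
--         start = i * period
--         end = start + period
--         if end > len(sequence):
--             break
--
--         if sequence[start:end] != sequence[:period]:
--             return False
--
--     return True
-- ===== SOURCE B (Python) =====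
-- def _validate_period(sequence, period, min_cycles=2):
--     """Validate period in one shot: the first max(min_cycles, 1) cycles,
--     taken as a single block, must equal the base cycle repeated."""
--     if len(sequence) < period * min_cycles:
--         return False
--     m = max(min_cycles, 1)
--     return sequence[:period * m] == sequence[:period] * m
-- ===== Notes on version B (the rewrite author's own statement) =====
-- stated objective: simpler
-- what changed: The cycle-by-cycle loop that slices out each cycle and compares it to the base is replaced by a single loop-free block comparison: the first max(min_cycles,1) cycles taken as one slice must equal the base cycle repeated (sequence[:period*m] == sequence[:period]*m).
import Mathlib
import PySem

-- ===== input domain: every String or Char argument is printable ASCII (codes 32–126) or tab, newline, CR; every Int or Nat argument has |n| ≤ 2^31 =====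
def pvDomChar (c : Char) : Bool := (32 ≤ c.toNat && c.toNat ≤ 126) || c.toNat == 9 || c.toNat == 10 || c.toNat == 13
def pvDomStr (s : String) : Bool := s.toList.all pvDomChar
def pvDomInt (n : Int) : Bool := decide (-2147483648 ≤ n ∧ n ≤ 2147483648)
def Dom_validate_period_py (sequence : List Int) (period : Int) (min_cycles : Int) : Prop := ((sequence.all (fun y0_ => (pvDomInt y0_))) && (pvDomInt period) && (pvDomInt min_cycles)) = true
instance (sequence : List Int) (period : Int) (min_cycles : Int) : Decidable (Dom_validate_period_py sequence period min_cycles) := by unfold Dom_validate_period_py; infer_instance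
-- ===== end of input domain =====

-- B replaces A's cycle-by-cycle slice-comparison loop with one loop-free block comparison
-- (the first max(min_cycles,1) cycles as a slice vs the base cycle repeated); same return values.

-- ===== PORT A =====
-- the 'for i in range(1, min_cycles)' loop: 'break' returns true for the rest of the function,
-- mismatching slices return False
def validatePeriodLoopA (sequence : List Int) (period : Int) : List Int → Bool
  | [] => true
  | i :: rest =>
    let start := i * period
    let stop := start + period
    if stop > (sequence.length : Int) then true
    else if PySem.List.slice sequence (some start) (some stop) ≠ PySem.List.slice sequence none (some period) then false
    else validatePeriodLoopA sequence period rest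

def validate_period_py (sequence : List Int) (period : Int) (min_cycles : Int) : Bool :=
  if (sequence.length : Int) < period * min_cycles then false
  else validatePeriodLoopA sequence period (PySem.List.pyRange 1 min_cycles 1)

-- ===== PORT B =====
-- Python 'xs * n' on lists (empty for n ≤ 0): exact
def pyListMul (xs : List Int) (n : Int) : List Int := (List.replicate n.toNat xs).flatten

def validate_period_py_alt (sequence : List Int) (period : Int) (min_cycles : Int) : Bool :=
  if (sequence.length : Int) < period * min_cycles then false
  else
    let m := max min_cycles 1
    decide (PySem.List.slice sequence none (some (period * m)) =
      pyListMul (PySem.List.slice sequence none (some period)) m)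

-- ===== PRECONDITION & SPEC =====
def Spec_validate_period_py (sequence : List Int) (period : Int) (min_cycles : Int) (out : Bool) : Prop := out = validate_period_py_alt sequence period min_cycles
instance (sequence : List Int) (period : Int) (min_cycles : Int) (out : Bool) : Decidable (Spec_validate_period_py sequence period min_cycles out) := by unfold Spec_validate_period_py; infer_instance

-- ===== CLAIM (what is proved, stated in full; the proofs are below) =====
def Claim_equal_validate_period_py : Prop := ∀ (sequence : List Int) (period : Int) (min_cycles : Int), Dom_validate_period_py sequence period min_cycles → Spec_validate_period_py sequence period min_cycles (validate_period_py sequence period min_cycles)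

-- ===== LEMMAS AND PROOFS =====

-- loop A is vacuously true when the period is zero
theorem loopA_zero (seq : List Int) (l : List Int) : validatePeriodLoopA seq 0 l = true := by
  induction l with
  | nil => rfl
  | cons i rest ih =>
    simp only [validatePeriodLoopA, mul_zero, add_zero]
    rw [if_neg (by omega), if_neg (by simp)]
    exact ih

-- a slice with both bounds negative and end ≤ start is empty
theorem slice_neg_neg_nil (seq : List Int) (a b : Int) (ha : a < 0) (hb : b ≤ a) :
    PySem.List.slice seq (some a) (some b) = [] := by
  have ha' : a = -(((-a).toNat : Nat) : Int) := by omega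
  have hb' : b = -(((-b).toNat : Nat) : Int) := by omega
  rw [ha', hb']
  apply List.eq_nil_of_length_eq_zero
  rw [PySem.List.length_slice, PySem.List.clampIdx_neg_natCast _ _ (by omega),
    PySem.List.clampIdx_neg_natCast _ _ (by omega)]
  omega

-- loop A is true when the period is negative and the list is no longer than |period|
theorem loopA_neg_short (seq : List Int) (p : Int) (hp : p < 0)
    (hlen : (seq.length : Int) ≤ -p) (l : List Int) (hl : ∀ i ∈ l, 1 ≤ i) :
    validatePeriodLoopA seq p l = true := by
  induction l with
  | nil => rfl
  | cons i rest ih =>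
    have hi : 1 ≤ i := hl i (by simp)
    simp only [validatePeriodLoopA]
    by_cases hbr : i * p + p > (seq.length : Int)
    · rw [if_pos hbr]
    · rw [if_neg hbr]
      have h1 : PySem.List.slice seq (some (i * p)) (some (i * p + p)) = [] :=
        slice_neg_neg_nil seq _ _ (by nlinarith) (by omega)
      have h2 : PySem.List.slice seq none (some p) = [] := by
        have hpe : p = -((((-p).toNat : Nat)) : Int) := by omega
        rw [hpe, PySem.List.slice_to_neg_natCast _ _ (by omega)]
        have h0 : seq.length - (-p).toNat = 0 := by omega
        rw [h0, List.take_zero]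
      rw [if_neg (by simp [h1, h2])]
      exact ih (fun j hj => hl j (by simp [hj]))

-- characterisation of loop A when no iteration can break
theorem loopA_char (seq : List Int) (p : Int) (l : List Int)
    (hnb : ∀ i ∈ l, i * p + p ≤ (seq.length : Int)) :
    validatePeriodLoopA seq p l = true ↔
      ∀ i ∈ l, PySem.List.slice seq (some (i * p)) (some (i * p + p)) = PySem.List.slice seq none (some p) := by
  induction l with
  | nil => simp [validatePeriodLoopA]
  | cons i rest ih =>
    have hni := hnb i (by simp)
    simp only [validatePeriodLoopA]
    rw [if_neg (by omega)]
    by_cases h : PySem.List.slice seq (some (i * p)) (some (i * p + p)) = PySem.List.slice seq none (some p)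
    · rw [if_neg (by simpa using h)]
      simp [h, ih (fun j hj => hnb j (by simp [hj]))]
    · rw [if_pos (by simpa using h)]
      simp [h]

-- the block-vs-chunks crux: the first M chunks of seq equal b iff the first P*M elements are b repeated
theorem blocks_iff (b : List Int) (P : Nat) (hb : b.length = P) :
    ∀ (M : Nat) (seq : List Int), P * M ≤ seq.length →
      (seq.take (P * M) = (List.replicate M b).flatten ↔
        ∀ I, I < M → (seq.drop (I * P)).take P = b) := by
  intro M
  induction M with
  | zero => intro seq _; simp
  | succ M ih =>
    intro seq hn
    have hPM : P * (M + 1) = P + P * M := by ring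
    rw [hPM, List.take_add, List.replicate_succ, List.flatten_cons]
    have hP : P ≤ seq.length := by nlinarith
    have hlen1 : (seq.take P).length = P := by
      rw [List.length_take]; omega
    constructor
    · intro h
      have hinj := List.append_inj h (by rw [hlen1, hb])
      obtain ⟨h1, h2⟩ := hinj
      have h2' := (ih (seq.drop P) (by rw [List.length_drop]; omega)).mp h2
      intro I hI
      cases I with
      | zero => simpa using h1
      | succ I =>
        have := h2' I (by omega)
        rw [List.drop_drop] at this
        rw [show (I + 1) * P = P + I * P by ring]
        exact this
    · intro h
      have h0 : seq.take P = b := by simpa using h 0 (by omega)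
      have hrest : (seq.drop P).take (P * M) = (List.replicate M b).flatten := by
        apply (ih (seq.drop P) (by rw [List.length_drop]; omega)).mpr
        intro I hI
        rw [List.drop_drop, show P + I * P = (I + 1) * P by ring]
        exact h (I + 1) (by omega)
      rw [h0, hrest]

-- bridge: the Python slice seq[I*P : I*P+P] with Nat-cast bounds is the I-th chunk
theorem chunk_slice (seq : List Int) (P I : Nat) :
    PySem.List.slice seq (some ((I : Int) * (P : Int))) (some ((I : Int) * (P : Int) + (P : Int))) =
      (seq.drop (I * P)).take P := by
  rw [show ((I : Int)) * ((P : Int)) = (((I * P : Nat)) : Int) by push_cast; ring,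
    PySem.List.slice_natCast_add]

theorem validate_period_py_spec : Claim_equal_validate_period_py := by
  intro seq p mc _
  unfold Spec_validate_period_py validate_period_py validate_period_py_alt
  by_cases hg : (seq.length : Int) < p * mc
  · rw [if_pos hg, if_pos hg]
  · rw [if_neg hg, if_neg hg]
    by_cases hmc : mc ≤ 1
    · -- empty loop on the A side; one trivially-true comparison on the B side
      have hm : max mc 1 = 1 := by omega
      rw [PySem.List.pyRange_one_eq_nil (by omega)]
      simp [validatePeriodLoopA, hm, pyListMul]
    · have hm : max mc 1 = mc := by omega
      simp only [hm]
      rcases lt_trichotomy p 0 with hp | hp | hp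
      · -- negative period
        by_cases hlen : (seq.length : Int) ≤ -p
        · -- base slice empty, every comparison holds on both sides
          rw [loopA_neg_short seq p hp hlen _
            (fun i hi => ((PySem.List.mem_pyRange_one).mp hi).1)]
          have h2 : PySem.List.slice seq none (some p) = [] := by
            have hpe : p = -((((-p).toNat : Nat)) : Int) := by omega
            rw [hpe, PySem.List.slice_to_neg_natCast _ _ (by omega)]
            have h0 : seq.length - (-p).toNat = 0 := by omega
            rw [h0, List.take_zero]
          have h1 : PySem.List.slice seq none (some (p * mc)) = [] := by
            have hpe : p * mc = -((((-(p * mc)).toNat : Nat)) : Int) := by nlinarith [Int.toNat_of_nonneg (show (0:Int) ≤ -(p*mc) by nlinarith)]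
            rw [hpe, PySem.List.slice_to_neg_natCast _ _ (by nlinarith [Int.toNat_of_nonneg (show (0:Int) ≤ -(p*mc) by nlinarith)])]
            have h0 : seq.length - (-(p * mc)).toNat = 0 := by
              have : (seq.length : Int) ≤ -(p * mc) := by nlinarith
              omega
            rw [h0, List.take_zero]
          simp [h1, h2, pyListMul]
        · -- base slice nonempty: A fails at i = 1, B's sides have different lengths
          rw [not_le] at hlen
          have hbase : (PySem.List.slice seq none (some p)).length = seq.length - (-p).toNat := by
            have hpe : p = -((((-p).toNat : Nat)) : Int) := by omega
            rw [hpe, PySem.List.slice_to_neg_natCast _ _ (by omega), List.length_take]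
            omega
          -- A side: first iteration compares [] against a nonempty base
          rw [PySem.List.pyRange_one_cons (by omega)]
          simp only [validatePeriodLoopA, one_mul]
          rw [if_neg (by omega)]
          have h1 : PySem.List.slice seq (some p) (some (p + p)) = [] :=
            slice_neg_neg_nil seq p (p + p) hp (by omega)
          have hbne : PySem.List.slice seq none (some p) ≠ [] := by
            intro hc
            rw [hc] at hbase
            simp at hbase
            omega
          rw [if_pos (by rw [h1]; exact fun hc => hbne hc.symm)]
          -- B side: lengths differ
          have hLHS : (PySem.List.slice seq none (some (p * mc))).length ≤ seq.length - (-p).toNat := by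
            rcases le_or_gt 0 ((seq.length : Int) + p * mc) with hc | hc
            · have hpe : p * mc = -(((((-(p * mc)).toNat : Nat))) : Int) := by
                have : (0:Int) ≤ -(p * mc) := by nlinarith
                omega
              rw [hpe, PySem.List.slice_to_neg_natCast _ _ (by nlinarith [Int.toNat_of_nonneg (show (0:Int) ≤ -(p*mc) by nlinarith)]), List.length_take]
              have : (-p).toNat ≤ (-(p * mc)).toNat := by
                have : -p ≤ -(p * mc) := by nlinarith
                omega
              omega
            · have hpe : p * mc = -(((((-(p * mc)).toNat : Nat))) : Int) := by
                have : (0:Int) ≤ -(p * mc) := by nlinarith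
                omega
              rw [hpe, PySem.List.slice_to_neg_natCast _ _ (by nlinarith [Int.toNat_of_nonneg (show (0:Int) ≤ -(p*mc) by nlinarith)]), List.length_take]
              omega
          have hRHS : (pyListMul (PySem.List.slice seq none (some p)) mc).length =
              mc.toNat * (seq.length - (-p).toNat) := by
            simp [pyListMul, hbase]
          have hne : PySem.List.slice seq none (some (p * mc)) ≠
              pyListMul (PySem.List.slice seq none (some p)) mc := by
            intro hc
            have := congrArg List.length hc
            rw [hRHS] at this
            have hb0 : 0 < seq.length - (-p).toNat := by omega
            have hmc2 : 2 ≤ mc.toNat := by omega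
            nlinarith [hLHS, this]
          simp [hne]
      · -- period = 0
        subst hp
        rw [loopA_zero]
        have hb : PySem.List.slice seq none (some (0:Int)) = List.take 0 seq := by
          rw [show (0:Int) = (((0:Nat)):Int) by simp, PySem.List.slice_to_natCast]
        simp [pyListMul, hb]
      · -- positive period, guard passed: no break, chunks ↔ one block
        have hP1 : (1:Int) ≤ p := by omega
        have hp' : p = ((p.toNat : Nat) : Int) := by omega
        have hmc' : mc = ((mc.toNat : Nat) : Int) := by omega
        have hn : p.toNat * mc.toNat ≤ seq.length := by
          have h : (p * mc : Int) ≤ (seq.length : Int) := by omega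
          rw [hp', hmc'] at h
          exact_mod_cast h
        rw [Bool.eq_iff_iff]
        rw [loopA_char seq p _ (by
          intro i hi
          obtain ⟨h1, h2⟩ := (PySem.List.mem_pyRange_one).mp hi
          nlinarith [Int.natCast_nonneg seq.length])]
        have hpm : p * mc = (((p.toNat * mc.toNat : Nat)) : Int) := by
          push_cast
          rw [Int.toNat_of_nonneg (by omega : (0:Int) ≤ p), Int.toNat_of_nonneg (by omega : (0:Int) ≤ mc)]
        rw [hpm, PySem.List.slice_to_natCast]
        have hbase : PySem.List.slice seq none (some p) = seq.take p.toNat := by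
          rw [PySem.List.slice_to _ (by omega : (0:Int) ≤ p)]
        rw [hbase]
        have hmuleq : pyListMul (seq.take p.toNat) mc = (List.replicate mc.toNat (seq.take p.toNat)).flatten := rfl
        rw [hmuleq]
        have hple : p.toNat ≤ seq.length :=
          le_trans (Nat.le_mul_of_pos_right _ (by omega)) hn
        have hblk := blocks_iff (seq.take p.toNat) p.toNat
          (by rw [List.length_take]; omega) mc.toNat seq hn
        rw [decide_eq_true_iff, hblk]
        constructor
        · intro h I hI
          cases I with
          | zero => simp
          | succ I =>
            have hi : (((I + 1 : Nat) : Int)) ∈ PySem.List.pyRange 1 mc 1 :=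
              (PySem.List.mem_pyRange_one).mpr ⟨by exact_mod_cast Nat.succ_le_succ (Nat.zero_le I), by rw [hmc']; exact_mod_cast hI⟩
            have hs := h _ hi
            rw [hp', chunk_slice seq p.toNat (I + 1)] at hs
            exact hs
        · intro h i hi
          obtain ⟨h1, h2⟩ := (PySem.List.mem_pyRange_one).mp hi
          have hi' : i = ((i.toNat : Nat) : Int) := by omega
          rw [hi', hp', chunk_slice seq p.toNat i.toNat]
          exact h i.toNat (by omega)
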